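-- pv_equiv track=rewrite | github.com/phattd15/arugo | base/util.py | color_rating_2
-- ===== SOURCE A (Python) =====
-- def color_rating_2(rating):
--     cp = [0, 1200, 1400, 1600, 1900, 2100, 2300, 2400, 2600, 3000, 4000]
--     cl = [
--         "#858585",
--         "#7bc76d",
--         "#6fc7c1",
--         "#6e78c4",
--         "#ad6eb8",
--         "#aba84d",
--         "#edab5a",
--         "#ed5555",
--         "#f50505",
--         "#960000",
--     ]
--
--     for i in range(10):
--         if rating < cp[i + 1]:
--             return cl[i]
-- ===== SOURCE B (Python) =====
-- import bisect
--
-- _BP = [1200, 1400, 1600, 1900, 2100, 2300, 2400, 2600, 3000, 4000]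
-- _CL = [
--     "#858585",
--     "#7bc76d",
--     "#6fc7c1",
--     "#6e78c4",
--     "#ad6eb8",
--     "#aba84d",
--     "#edab5a",
--     "#ed5555",
--     "#f50505",
--     "#960000",
-- ]
--
-- def color_rating_2(rating):
--     idx = bisect.bisect_right(_BP, rating)
--     return _CL[idx] if idx < 10 else None
-- ===== Notes on version B (the rewrite author's own statement) =====
-- stated objective: idiomatic
-- what changed: Replaced the per-breakpoint linear scan with early return by a single bisect_right binary search over the breakpoint list, indexing the color table directly (None when the index falls past the last breakpoint).
import Mathlib
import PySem

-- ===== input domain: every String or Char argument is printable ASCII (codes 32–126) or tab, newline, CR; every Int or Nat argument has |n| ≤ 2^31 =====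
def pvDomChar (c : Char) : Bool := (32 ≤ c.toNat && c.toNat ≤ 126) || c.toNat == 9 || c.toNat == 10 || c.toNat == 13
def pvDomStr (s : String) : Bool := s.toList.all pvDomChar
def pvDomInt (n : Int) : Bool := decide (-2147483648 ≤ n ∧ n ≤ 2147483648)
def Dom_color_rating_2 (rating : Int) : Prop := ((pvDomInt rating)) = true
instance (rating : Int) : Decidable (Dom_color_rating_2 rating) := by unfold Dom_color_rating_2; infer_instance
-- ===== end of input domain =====

-- B replaces A's linear scan over the breakpoints by a bisect_right binary search (idiomatic, same result).

-- ===== PORT A =====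
def pvCp : List Int := [0, 1200, 1400, 1600, 1900, 2100, 2300, 2400, 2600, 3000, 4000]
def pvCl : List String :=
  ["#858585", "#7bc76d", "#6fc7c1", "#6e78c4", "#ad6eb8",
   "#aba84d", "#edab5a", "#ed5555", "#f50505", "#960000"]

-- A's 'for i in range(10): if rating < cp[i+1]: return cl[i]' loop; falls through to None
def pvALoop (rating : Int) : List Nat → Option String
  | [] => none
  | i :: rest =>
    if rating < pvCp.getD (i + 1) 0 then some (pvCl.getD i "") else pvALoop rating rest

def color_rating_2 (rating : Int) : Option String :=
  pvALoop rating (List.range 10)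

-- ===== PORT B =====
def pvBp : List Int := [1200, 1400, 1600, 1900, 2100, 2300, 2400, 2600, 3000, 4000]

-- bisect.bisect_right's while-loop; fuel = list length bounds the iterations (hi - lo shrinks each step)
def pvBisectRight (a : List Int) (x : Int) : Nat → Nat → Nat → Nat
  | 0, lo, _ => lo
  | fuel + 1, lo, hi =>
    if lo < hi then
      let mid := (lo + hi) / 2
      if x < a.getD mid 0 then pvBisectRight a x fuel lo mid
      else pvBisectRight a x fuel (mid + 1) hi
    else lo

def color_rating_2_alt (rating : Int) : Option String :=
  let idx := pvBisectRight pvBp rating pvBp.length 0 pvBp.length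
  if idx < 10 then some (pvCl.getD idx "") else none

-- ===== PRECONDITION & SPEC =====
def Spec_color_rating_2 (rating : Int) (out : Option String) : Prop := out = color_rating_2_alt rating
instance (rating : Int) (out : Option String) : Decidable (Spec_color_rating_2 rating out) := by unfold Spec_color_rating_2; infer_instance

-- ===== CLAIM (what is proved, stated in full; the proofs are below) =====
def Claim_equal_color_rating_2 : Prop := ∀ (rating : Int), Dom_color_rating_2 rating → Spec_color_rating_2 rating (color_rating_2 rating)

-- ===== LEMMAS AND PROOFS =====

-- A's scan, written out as the nested conditional it traces
theorem pv_aTrace (r : Int) : color_rating_2 r =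
  (if r < 1200 then some "#858585" else if r < 1400 then some "#7bc76d" else
   if r < 1600 then some "#6fc7c1" else if r < 1900 then some "#6e78c4" else
   if r < 2100 then some "#ad6eb8" else if r < 2300 then some "#aba84d" else
   if r < 2400 then some "#edab5a" else if r < 2600 then some "#ed5555" else
   if r < 3000 then some "#f50505" else if r < 4000 then some "#960000" else none) := by
  simp [color_rating_2, pvALoop, pvCp, pvCl, List.range_succ]

-- B's binary search, written out as the comparison tree it traces
theorem pv_bTrace (r : Int) : color_rating_2_alt r =
  (if r < 2300 then (if r < 1600 then (if r < 1400 then (if r < 1200 then some "#858585" else some "#7bc76d") else some "#6fc7c1") else (if r < 2100 then (if r < 1900 then some "#6e78c4" else some "#ad6eb8") else some "#aba84d")) else (if r < 3000 then (if r < 2600 then (if r < 2400 then some "#edab5a" else some "#ed5555") else some "#f50505") else (if r < 4000 then some "#960000" else none))) := by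
  simp [color_rating_2_alt, pvBisectRight, pvBp, pvCl]
  split_ifs <;> first | rfl | omega

-- ===== VERDICT (by name: the statement is the Claim_ definition above) =====
theorem color_rating_2_spec : Claim_equal_color_rating_2 := by
  intro r _
  unfold Spec_color_rating_2
  rw [pv_aTrace, pv_bTrace]
  split_ifs <;> first | rfl | omega
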